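-- pv_equiv track=rewrite | github.com/LucasFrank/Ex02-Avaliacao-Desempenho-Sistemas | scriptTesting.py | busyTime
-- ===== SOURCE A (Python) =====
-- def busyTime(us):
--     count  = 0
--     busyTimeList = []
--     for i in us:
--         if i > 10:
--             count += 1
--         elif count != 0:
--             busyTimeList.append(count)
--             count = 0
--
--     return busyTimeList
-- ===== SOURCE B (Python) =====
-- def busyTime(us):
--     # Boundary decomposition: a busy run (values > 10) is recorded exactly when
--     # a non-busy element terminates it; its length is the gap between
--     # consecutive non-busy indices minus one.
--     bounds = [i for i, v in enumerate(us) if v <= 10]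
--     return [b - a - 1 for a, b in zip([-1] + bounds, bounds) if b - a > 1]
-- ===== Notes on version B (the rewrite author's own statement) =====
-- stated objective: alternative
-- what changed: Replaces the stateful counter loop by a two-phase boundary decomposition: collect the indices of non-busy elements (<= 10), then emit the gaps between consecutive boundaries (minus one) when positive; a trailing busy run is never emitted because no boundary closes it, matching A without extra state.
import Mathlib
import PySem

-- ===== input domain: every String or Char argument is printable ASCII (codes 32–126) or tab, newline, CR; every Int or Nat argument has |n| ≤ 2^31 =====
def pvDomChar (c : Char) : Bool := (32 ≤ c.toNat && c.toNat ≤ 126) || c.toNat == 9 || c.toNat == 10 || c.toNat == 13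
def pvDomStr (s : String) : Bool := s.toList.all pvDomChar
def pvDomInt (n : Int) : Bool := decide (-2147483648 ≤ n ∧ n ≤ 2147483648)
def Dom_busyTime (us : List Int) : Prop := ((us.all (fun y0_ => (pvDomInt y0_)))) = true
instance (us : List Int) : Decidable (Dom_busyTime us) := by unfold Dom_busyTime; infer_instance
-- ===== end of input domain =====

-- B replaces A's stateful counter loop by a boundary decomposition (indices of
-- non-busy elements, then gaps between consecutive boundaries); same cost, no speed claim.

-- ===== PORT A =====
-- literal port of A: fold over us carrying (count, busyTimeList)
def busyTime (us : List Int) : List Int :=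
  (us.foldl
    (fun (st : Int × List Int) i =>
      if i > 10 then (st.1 + 1, st.2)
      else if st.1 ≠ 0 then (0, st.2 ++ [st.1])
      else st)
    (0, [])).2

-- ===== PORT B =====
-- literal port of Source B: bounds = [i for i,v in enumerate(us) if v <= 10];
-- [b-a-1 for a,b in zip([-1]+bounds, bounds) if b-a > 1]
def busyTime_alt (us : List Int) : List Int :=
  let bounds : List Int :=
    ((PySem.List.enumerate us).filter (fun p => p.2 ≤ 10)).map (fun p => p.1)
  ((((-1 : Int) :: bounds).zip bounds).filter (fun p => p.2 - p.1 > 1)).map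
    (fun p => p.2 - p.1 - 1)

-- ===== PRECONDITION & SPEC =====
def Spec_busyTime (us : List Int) (out : List Int) : Prop := out = busyTime_alt us
instance (us : List Int) (out : List Int) : Decidable (Spec_busyTime us out) := by unfold Spec_busyTime; infer_instance

-- ===== CLAIM (what is proved, stated in full; the proofs are below) =====
def Claim_equal_busyTime : Prop := ∀ (us : List Int), Dom_busyTime us → Spec_busyTime us (busyTime us)

-- ===== LEMMAS AND PROOFS =====

/-- common reference: run lengths of `> 10` runs closed by a `≤ 10` element,
    with `c` busy elements pending. -/
def pvBList : List Int → Nat → List Int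
  | [], _ => []
  | i :: t, c =>
    if i > 10 then pvBList t (c + 1)
    else (if c ≠ 0 then [(c : Int)] else []) ++ pvBList t 0

theorem pvA_invariant (us : List Int) : ∀ (c : Nat) (acc : List Int),
    (us.foldl
      (fun (st : Int × List Int) i =>
        if i > 10 then (st.1 + 1, st.2)
        else if st.1 ≠ 0 then (0, st.2 ++ [st.1])
        else st)
      ((c : Int), acc)).2 = acc ++ pvBList us c := by
  induction us with
  | nil => intro c acc; simp [pvBList]
  | cons i t ih =>
    intro c acc
    by_cases hi : i > 10
    · have h1 : ((c : Int) + 1) = ((c + 1 : Nat) : Int) := by push_cast; ring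
      simp only [List.foldl_cons, pvBList, hi, if_pos, h1]
      simpa using ih (c + 1) acc
    · by_cases hc : c = 0
      · subst hc
        simp only [List.foldl_cons, pvBList, hi, if_neg]
        simpa using ih 0 acc
      · have hc' : (c : Int) ≠ 0 := by exact_mod_cast hc
        simp only [List.foldl_cons, pvBList, hi, if_neg, hc', hc, ite_true, if_pos,
          ne_eq, not_false_iff]
        rw [show ((0 : Int), acc ++ [(c : Int)]) = (((0 : Nat) : Int), acc ++ [(c : Int)]) by norm_num]
        rw [ih 0 (acc ++ [(c : Int)])]
        simp [hc]

theorem pvA_eq (us : List Int) : busyTime us = pvBList us 0 := by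
  unfold busyTime
  simpa using pvA_invariant us 0 []

/-- boundary indices (as Int) of the `≤ 10` elements, starting at offset k. -/
def pvBounds : Int → List Int → List Int
  | _, [] => []
  | k, i :: t => if i ≤ 10 then k :: pvBounds (k + 1) t else pvBounds (k + 1) t

theorem pvBounds_eq (us : List Int) : ∀ (k : Int),
    ((PySem.List.enumerate us k).filter (fun p => p.2 ≤ 10)).map (fun p => p.1)
      = pvBounds k us := by
  induction us with
  | nil => intro k; simp [PySem.List.enumerate_nil, pvBounds]
  | cons i t ih =>
    intro k
    by_cases hi : i ≤ 10 <;>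
      simp [PySem.List.enumerate_cons, pvBounds, hi, List.filter_cons, ih (k + 1)]

/-- the zip-filter-map over consecutive boundary pairs, recursively. -/
def pvZf : Int → List Int → List Int
  | _, [] => []
  | a, b :: bs => (if b - a > 1 then [b - a - 1] else []) ++ pvZf b bs

theorem pvZf_eq (bs : List Int) : ∀ (a : Int),
    (((a :: bs).zip bs).filter (fun p => p.2 - p.1 > 1)).map (fun p => p.2 - p.1 - 1)
      = pvZf a bs := by
  induction bs with
  | nil => intro a; simp [pvZf]
  | cons b bs ih =>
    intro a
    by_cases h : b - a > 1 <;>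
      simp [pvZf, List.zip_cons_cons, List.filter_cons, h, ih b]

theorem pvMain (us : List Int) : ∀ (k p : Int) (c : Nat),
    k - p - 1 = (c : Int) → pvZf p (pvBounds k us) = pvBList us c := by
  induction us with
  | nil => intro k p c _; simp [pvBounds, pvZf, pvBList]
  | cons i t ih =>
    intro k p c hc
    by_cases hi : i > 10
    · have hi' : ¬ i ≤ 10 := by omega
      simp only [pvBounds, pvBList, hi, hi', if_neg, if_pos, ite_true, ite_false]
      exact ih (k + 1) p (c + 1) (by push_cast; omega)
    · have hi' : i ≤ 10 := by omega
      simp only [pvBounds, pvBList, hi, hi', ite_true, ite_false]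
      have hrest : pvZf k (pvBounds (k + 1) t) = pvBList t 0 := ih (k + 1) k 0 (by omega)
      simp only [pvZf, hrest]
      by_cases hc0 : c = 0
      · have : ¬ k - p > 1 := by omega
        simp [this, hc0]
      · have h1 : k - p > 1 := by
          have : (1 : Int) ≤ (c : Int) := by exact_mod_cast Nat.one_le_iff_ne_zero.mpr hc0
          omega
        simp [h1, hc0, hc]

theorem pvB_eq (us : List Int) : busyTime_alt us = pvBList us 0 := by
  unfold busyTime_alt
  rw [pvBounds_eq us 0, pvZf_eq]
  exact pvMain us 0 (-1) 0 (by norm_num)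

-- ===== VERDICT (by name: the statement is the Claim_ definition above) =====
theorem busyTime_spec : Claim_equal_busyTime := by
  intro us _
  unfold Spec_busyTime
  rw [pvA_eq, pvB_eq]
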